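-- pv_equiv track=rewrite | github.com/stefandurlesteanu/Codecool | 5th_TW_week/ERP Stage1/hr/hr.py | get_oldest_person
-- ===== SOURCE A (Python) =====
-- def get_oldest_person(table):
--     """
--     Question: Who is the oldest person?
--
--     Args:
--         table (list): data table to work on
--
--     Returns:
--         list: A list of strings (name or names if there are two more with the same value)
--     """
--     count_for_table = 0
--     list_age = []
--     while count_for_table < len(table):
--
--         list_age.append(table[count_for_table][2])
--         count_for_table += 1
--     max_list_age = max(list_age)
--     name_list = []
--     count_table_age = 0
--     while count_table_age < len(table):
--         if max_list_age == str(table[count_table_age][2]):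
--             name_list.append(table[count_table_age][1])
--             count_table_age += 1
--         else:
--             count_table_age += 1
--     return name_list
-- ===== SOURCE B (Python) =====
-- def get_oldest_person(table):
--     """
--     Question: Who is the oldest person?
--
--     Args:
--         table (list): data table to work on
--
--     Returns:
--         list: A list of strings (name or names if there are two more with the same value)
--     """
--     names_by_age = {}
--     for row in table:
--         names_by_age.setdefault(row[2], []).append(row[1])
--     max_age = max(row[2] for row in table)
--     return names_by_age[max_age]
-- ===== Notes on version B (the rewrite author's own statement) =====
-- stated objective: alternative
-- what changed: Replaces A's two index-counting while-loops (collect all ages, then rescan the whole table comparing each age to the max) by one pass that groups names by age in a dict plus a max over the ages, answered by a single dict lookup; Pre_ excludes only inputs where A raises (empty table: ValueError from max; rows shorter than 3: IndexError).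
import Mathlib
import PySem

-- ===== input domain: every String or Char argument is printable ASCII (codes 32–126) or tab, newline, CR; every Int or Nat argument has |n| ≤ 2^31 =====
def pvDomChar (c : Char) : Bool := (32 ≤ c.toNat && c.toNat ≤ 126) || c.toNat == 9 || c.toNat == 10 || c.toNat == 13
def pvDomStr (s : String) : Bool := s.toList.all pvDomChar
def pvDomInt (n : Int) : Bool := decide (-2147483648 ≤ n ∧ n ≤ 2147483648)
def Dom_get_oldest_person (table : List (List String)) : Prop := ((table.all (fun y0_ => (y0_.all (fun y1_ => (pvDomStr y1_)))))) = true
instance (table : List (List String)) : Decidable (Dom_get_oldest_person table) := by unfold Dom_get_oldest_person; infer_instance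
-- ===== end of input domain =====

-- B replaces A's two index-counting scans (collect ages, rescan comparing to the max) by one
-- grouping pass into a dict keyed by age plus a max over the ages, answered by a single lookup
-- (alternative decomposition, same O(n) cost).


-- ===== PORT A =====
def get_oldest_person (table : List (List String)) : List String :=
  -- while count_for_table < len(table): list_age.append(table[count_for_table][2])
  let list_age := (PySem.List.pyRange 0 (PySem.List.len table)).foldl
      (fun acc i => acc ++ [PySem.List.pyGetD (PySem.List.pyGetD table i []) 2 ""]) []
  -- max_list_age = max(list_age)   (Pre_ excludes the empty table, where Python raises ValueError)
  let max_list_age := (PySem.List.max? list_age (fun x => x)).getD ""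
  -- second while loop: append table[i][1] when max_list_age == str(table[i][2])  (str of a string is itself)
  (PySem.List.pyRange 0 (PySem.List.len table)).foldl
      (fun acc i =>
        if max_list_age == PySem.List.pyGetD (PySem.List.pyGetD table i []) 2 "" then
          acc ++ [PySem.List.pyGetD (PySem.List.pyGetD table i []) 1 ""]
        else acc) []

-- ===== PORT B =====
def get_oldest_person_alt (table : List (List String)) : List String :=
  -- for row in table: names_by_age.setdefault(row[2], []).append(row[1])
  let names_by_age := table.foldl
      (fun d row =>
        d.insert (PySem.List.pyGetD row 2 "")
          (d.getD (PySem.List.pyGetD row 2 "") [] ++ [PySem.List.pyGetD row 1 ""]))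
      (PySem.Dict.empty : PySem.Dict String (List String))
  -- max_age = max(row[2] for row in table)   (Pre_ excludes the empty table)
  let max_age := (PySem.List.max? (table.map (fun row => PySem.List.pyGetD row 2 "")) (fun x => x)).getD ""
  -- names_by_age[max_age]; on Pre_ the key is always present (max_age is one of the ages),
  -- so Python's KeyError cannot occur and the lookup is exactly the found value
  names_by_age.getD max_age []

-- ===== PRECONDITION & SPEC =====
-- Pre_ excludes exactly the inputs where Python A raises: the empty table (max of an empty
-- list is ValueError) and any row shorter than 3 (row[2] is IndexError).
def Pre_get_oldest_person (table : List (List String)) : Prop :=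
  table ≠ [] ∧ ∀ row ∈ table, 3 ≤ row.length
instance (table : List (List String)) : Decidable (Pre_get_oldest_person table) := by
  unfold Pre_get_oldest_person; infer_instance

def pvWitness_get_oldest_person : List (List String) :=
  [["1", "Alice", "34"], ["2", "Bob", "34"], ["3", "Carol", "29"]]

def Spec_get_oldest_person (table : List (List String)) (out : List String) : Prop := out = get_oldest_person_alt table
instance (table : List (List String)) (out : List String) : Decidable (Spec_get_oldest_person table out) := by unfold Spec_get_oldest_person; infer_instance

-- ===== CLAIM (what is proved, stated in full; the proofs are below) =====
def Claim_equal_get_oldest_person : Prop := ∀ (table : List (List String)), Dom_get_oldest_person table → Pre_get_oldest_person table → Spec_get_oldest_person table (get_oldest_person table)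

-- ===== LEMMAS AND PROOFS =====

-- getD of B's grouping dict: the names of the rows whose age equals the key, in order.
theorem getD_build_dict (rows : List (List String)) (d : PySem.Dict String (List String)) (k : String) :
    (rows.foldl
      (fun d row =>
        d.insert (PySem.List.pyGetD row 2 "")
          (d.getD (PySem.List.pyGetD row 2 "") [] ++ [PySem.List.pyGetD row 1 ""])) d).getD k []
    = d.getD k [] ++
      (rows.filter (fun r => k == PySem.List.pyGetD r 2 "")).map (fun r => PySem.List.pyGetD r 1 "") := by
  induction rows generalizing d with
  | nil => simp
  | cons r t ih =>
    simp only [List.foldl_cons, List.filter_cons, ih, PySem.Dict.getD_insert]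
    by_cases h : k = PySem.List.pyGetD r 2 ""
    · simp [h]
    · simp [h, beq_iff_eq]

-- ===== VERDICT (by name: the statement is the Claim_ definition above) =====
theorem get_oldest_person_spec : Claim_equal_get_oldest_person := by
  intro table _ _
  unfold Spec_get_oldest_person get_oldest_person get_oldest_person_alt
  rw [PySem.List.foldl_pyRange_pyGetD table ([] : List String)
        (fun acc row => acc ++ [PySem.List.pyGetD row 2 ""]) [] le_rfl,
      PySem.List.foldl_pyRange_pyGetD table ([] : List String)
        (fun acc row =>
          if (PySem.List.max? (List.foldl (fun acc row => acc ++ [PySem.List.pyGetD row 2 ""]) []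
                (List.drop (Int.toNat 0) table)) (fun x => x)).getD "" == PySem.List.pyGetD row 2 "" then
            acc ++ [PySem.List.pyGetD row 1 ""]
          else acc) [] le_rfl]
  simp only [Int.toNat_zero, List.drop_zero,
    PySem.List.foldl_append_singleton_eq_map, List.nil_append,
    PySem.List.foldl_append_if, getD_build_dict]
  simp [PySem.Dict.getD, PySem.Dict.empty, PySem.Dict.get?]
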